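-- pv_equiv track=rewrite | github.com/daneel95/Master_Homework | SecondYear/ComputerVision/Homework1/calculate_mark.py | remove_reduntant_horizontal_lines
-- ===== SOURCE A (Python) =====
-- def remove_reduntant_horizontal_lines(horizontal, threshold):
--     # remove redundant horizontal lines
--     to_remove = []
--
--     for i in range(1, len(horizontal)):
--         y1 = horizontal[i - 1][1]
--         y2 = horizontal[i][1]
--         if abs(y2 - y1) < threshold:
--             to_remove.append(i - 1)
--
--     new_horizontals = []
--     for i, el in enumerate(horizontal):
--         if i not in to_remove:
--             new_horizontals.append(el)
--
--     return new_horizontals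
-- ===== SOURCE B (Python) =====
-- def remove_reduntant_horizontal_lines(horizontal, threshold):
--     # One forward pass: keep a line unless the NEXT line is too close to it.
--     n = len(horizontal)
--     new_horizontals = []
--     for j in range(n):
--         if j == n - 1 or abs(horizontal[j + 1][1] - horizontal[j][1]) >= threshold:
--             new_horizontals.append(horizontal[j])
--     return new_horizontals
-- ===== Notes on version B (the rewrite author's own statement) =====
-- stated objective: simpler
-- what changed: Replaced A's two passes (build a to_remove index list, then filter by list membership) with a single forward pass that keeps a line iff it is the last one or the next line's y-coordinate is at least threshold away.
import Mathlib
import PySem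

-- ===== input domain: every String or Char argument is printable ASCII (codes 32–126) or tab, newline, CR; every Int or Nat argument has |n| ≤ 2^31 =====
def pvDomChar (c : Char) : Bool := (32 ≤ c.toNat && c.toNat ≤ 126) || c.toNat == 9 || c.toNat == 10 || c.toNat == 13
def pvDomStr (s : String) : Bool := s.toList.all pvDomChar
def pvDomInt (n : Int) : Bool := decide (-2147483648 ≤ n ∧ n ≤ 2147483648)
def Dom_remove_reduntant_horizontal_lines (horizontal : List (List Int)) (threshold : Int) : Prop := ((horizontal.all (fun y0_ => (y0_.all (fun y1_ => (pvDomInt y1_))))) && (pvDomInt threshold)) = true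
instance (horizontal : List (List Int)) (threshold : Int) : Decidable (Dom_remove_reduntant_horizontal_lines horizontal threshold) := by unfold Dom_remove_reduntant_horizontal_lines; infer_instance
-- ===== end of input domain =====

-- B replaces A's two passes (collect a removal-index list, then filter by membership) with a single
-- forward pass that keeps a line unless the next line is too close — objective: simpler.

-- ===== PORT A =====
def remove_reduntant_horizontal_lines (horizontal : List (List Int)) (threshold : Int) : List (List Int) :=
  let to_remove : List Int :=
    (PySem.List.pyRange 1 (horizontal.length : Int) 1).foldl (fun acc i =>
      let y1 := PySem.List.pyGetD (PySem.List.pyGetD horizontal (i - 1) []) 1 0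
      let y2 := PySem.List.pyGetD (PySem.List.pyGetD horizontal i []) 1 0
      if |y2 - y1| < threshold then acc ++ [i - 1] else acc) []
  (PySem.List.enumerate horizontal 0).foldl (fun acc el =>
    if el.1 ∉ to_remove then acc ++ [el.2] else acc) []

-- ===== PORT B =====
def remove_reduntant_horizontal_lines_alt (horizontal : List (List Int)) (threshold : Int) : List (List Int) :=
  let n : Int := (horizontal.length : Int)
  (PySem.List.pyRange 0 n 1).foldl (fun acc j =>
    if j = n - 1 ∨ threshold ≤ |PySem.List.pyGetD (PySem.List.pyGetD horizontal (j + 1) []) 1 0 -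
        PySem.List.pyGetD (PySem.List.pyGetD horizontal j []) 1 0|
    then acc ++ [PySem.List.pyGetD horizontal j []]
    else acc) []

-- ===== PRECONDITION & SPEC =====
-- Pre_ excludes exactly the inputs where Python raises IndexError: when there are at least two lines,
-- every accessed row needs an element at index 1, i.e. every row must have length ≥ 2.
def Pre_remove_reduntant_horizontal_lines (horizontal : List (List Int)) (threshold : Int) : Prop :=
  horizontal.length ≤ 1 ∨ ∀ row ∈ horizontal, 2 ≤ row.length
instance (horizontal : List (List Int)) (threshold : Int) : Decidable (Pre_remove_reduntant_horizontal_lines horizontal threshold) := by unfold Pre_remove_reduntant_horizontal_lines; infer_instance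

def pvWitness_remove_reduntant_horizontal_lines : List (List Int) × Int := ([[0, 0], [1, 5], [2, 6]], 3)

def Spec_remove_reduntant_horizontal_lines (horizontal : List (List Int)) (threshold : Int) (out : List (List Int)) : Prop := out = remove_reduntant_horizontal_lines_alt horizontal threshold
instance (horizontal : List (List Int)) (threshold : Int) (out : List (List Int)) : Decidable (Spec_remove_reduntant_horizontal_lines horizontal threshold out) := by unfold Spec_remove_reduntant_horizontal_lines; infer_instance

-- ===== CLAIM (what is proved, stated in full; the proofs are below) =====
def Claim_equal_remove_reduntant_horizontal_lines : Prop := ∀ (horizontal : List (List Int)) (threshold : Int), Dom_remove_reduntant_horizontal_lines horizontal threshold → Pre_remove_reduntant_horizontal_lines horizontal threshold → Spec_remove_reduntant_horizontal_lines horizontal threshold (remove_reduntant_horizontal_lines horizontal threshold)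

-- ===== LEMMAS AND PROOFS =====

-- Prop-conditioned form of PySem.List.foldl_append_if.
theorem pvFoldlAppendIte {α β : Type} (P : α → Prop) [DecidablePred P] (f : α → β) (l : List α) (acc : List β) :
    l.foldl (fun acc x => if P x then acc ++ [f x] else acc) acc
      = acc ++ (l.filter (fun x => decide (P x))).map f := by
  simpa using PySem.List.foldl_append_if (fun x => decide (P x)) f l acc

-- Shifting a nonnegative Python index past a cons cell.
theorem pvGetD_cons_shift (x : List Int) (xs : List (List Int)) (m : Int) (hm : 1 ≤ m) :
    PySem.List.pyGetD (x :: xs) m [] = PySem.List.pyGetD xs (m - 1) [] := by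
  simp only [PySem.List.pyGetD, PySem.List.pyGet?, PySem.List.pyIdx?, List.length_cons]
  have h0 : (0:Int) ≤ m := by omega
  have h0' : (0:Int) ≤ m - 1 := by omega
  simp only [h0, h0', if_pos]
  have hiff : m < ((xs.length : Int) + 1) ↔ m - 1 < (xs.length : Int) := by omega
  by_cases hlt : m - 1 < (xs.length : Int)
  · rw [if_pos (by exact_mod_cast hiff.mpr hlt), if_pos hlt]
    have hmt : m.toNat = (m - 1).toNat + 1 := by omega
    rw [hmt]; rfl
  · rw [if_neg (by exact_mod_cast fun h => hlt (hiff.mp h)), if_neg hlt]; rfl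

-- Canonical one-pass form both ports are reduced to.
def pvKeep (P : Int → Bool) : List (List Int) → Int → List (List Int)
  | [], _ => []
  | x :: xs, s => (if P s then [x] else []) ++ pvKeep P xs (s + 1)

theorem pvKeep_congr (P Q : Int → Bool) (h : List (List Int)) (s : Int)
    (hpq : ∀ j : Int, s ≤ j → j < s + h.length → P j = Q j) :
    pvKeep P h s = pvKeep Q h s := by
  induction h generalizing s with
  | nil => rfl
  | cons x xs ih =>
    simp only [pvKeep]
    rw [hpq s (le_refl s) (by simp), ih (s + 1) (fun j hj1 hj2 => hpq j (by omega) (by simp only [List.length_cons] at hj2 ⊢; push_cast at hj2 ⊢; omega))]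

theorem pvEnumFilterMap (P : Int → Bool) (h : List (List Int)) (s : Int) :
    ((PySem.List.enumerate h s).filter (fun el => P el.1)).map Prod.snd = pvKeep P h s := by
  induction h generalizing s with
  | nil => simp [PySem.List.enumerate, pvKeep]
  | cons x xs ih =>
    simp only [PySem.List.enumerate_cons, List.filter_cons, pvKeep]
    by_cases hP : P s
    · simp [hP, ih]
    · simp [hP, ih]

theorem pvRangeFilterMap (Q : Int → Bool) (h : List (List Int)) (s : Int) :
    ((PySem.List.pyRange s (s + (h.length : Int)) 1).filter (fun j => Q j)).map
        (fun j => PySem.List.pyGetD h (j - s) []) = pvKeep Q h s := by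
  induction h generalizing s with
  | nil => simp [PySem.List.pyRange_one_eq_nil, pvKeep]
  | cons x xs ih =>
    rw [PySem.List.pyRange_one_cons (by simp only [List.length_cons]; omega)]
    simp only [List.filter_cons, pvKeep]
    have hb : s + ((x :: xs).length : Int) = (s + 1) + (xs.length : Int) := by
      simp only [List.length_cons, Nat.cast_add, Nat.cast_one]; ring
    have htail : ((PySem.List.pyRange (s + 1) (s + ((x :: xs).length : Int)) 1).filter (fun j => Q j)).map
        (fun j => PySem.List.pyGetD (x :: xs) (j - s) []) = pvKeep Q xs (s + 1) := by
      rw [hb, ← ih (s + 1)]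
      apply List.map_congr_left
      intro j hj
      have hj' : s + 1 ≤ j := by
        have := PySem.List.mem_pyRange_one.1 (List.mem_of_mem_filter hj)
        omega
      rw [pvGetD_cons_shift x xs (j - s) (by omega)]
      congr 1
      omega
    by_cases hQ : Q s
    · simp only [hQ, if_pos, List.map_cons]
      rw [show s - s = (0:Int) by omega, PySem.List.pyGetD_zero_cons]
      rw [htail]
      rfl
    · simp only [hQ]
      simp only [Bool.false_eq_true, if_false]
      exact htail

-- Membership in A's to_remove list.
theorem pvMemToRemove (h : List (List Int)) (t : Int) (m : Int) :
    m ∈ (PySem.List.pyRange 1 (h.length : Int) 1).foldl (fun acc i =>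
        if |PySem.List.pyGetD (PySem.List.pyGetD h i []) 1 0 -
            PySem.List.pyGetD (PySem.List.pyGetD h (i - 1) []) 1 0| < t
        then acc ++ [i - 1] else acc) ([] : List Int)
      ↔ 0 ≤ m ∧ m + 1 < (h.length : Int) ∧
          |PySem.List.pyGetD (PySem.List.pyGetD h (m + 1) []) 1 0 -
            PySem.List.pyGetD (PySem.List.pyGetD h m []) 1 0| < t := by
  rw [pvFoldlAppendIte (fun i : Int => |PySem.List.pyGetD (PySem.List.pyGetD h i []) 1 0 -
        PySem.List.pyGetD (PySem.List.pyGetD h (i - 1) []) 1 0| < t) (fun i => i - 1)]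
  simp only [List.nil_append, List.mem_map, List.mem_filter, decide_eq_true_eq,
    PySem.List.mem_pyRange_one]
  constructor
  · rintro ⟨i, ⟨⟨h1, h2⟩, h3⟩, he⟩
    have hi : i = m + 1 := by omega
    subst hi
    have hmm : m + 1 - 1 = m := by ring
    rw [hmm] at h3
    exact ⟨by omega, by omega, h3⟩
  · rintro ⟨h0, h1, h2⟩
    refine ⟨m + 1, ⟨⟨by omega, by omega⟩, ?_⟩, by omega⟩
    have hmm : m + 1 - 1 = m := by ring
    rw [hmm]
    exact h2

-- ===== VERDICT (by name: the statement is the Claim_ definition above) =====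
theorem remove_reduntant_horizontal_lines_spec : Claim_equal_remove_reduntant_horizontal_lines := by
  intro h t _ _
  unfold Spec_remove_reduntant_horizontal_lines
  show (PySem.List.enumerate h 0).foldl (fun acc el =>
      if el.1 ∉ (PySem.List.pyRange 1 (h.length : Int) 1).foldl (fun acc i =>
          if |PySem.List.pyGetD (PySem.List.pyGetD h i []) 1 0 -
              PySem.List.pyGetD (PySem.List.pyGetD h (i - 1) []) 1 0| < t
          then acc ++ [i - 1] else acc) ([] : List Int)
      then acc ++ [el.2] else acc) []
    = (PySem.List.pyRange 0 (h.length : Int) 1).foldl (fun acc j =>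
      if j = (h.length : Int) - 1 ∨ t ≤ |PySem.List.pyGetD (PySem.List.pyGetD h (j + 1) []) 1 0 -
          PySem.List.pyGetD (PySem.List.pyGetD h j []) 1 0|
      then acc ++ [PySem.List.pyGetD h j []]
      else acc) []
  rw [pvFoldlAppendIte (fun el : Int × List Int =>
        el.1 ∉ (PySem.List.pyRange 1 (h.length : Int) 1).foldl (fun acc i =>
          if |PySem.List.pyGetD (PySem.List.pyGetD h i []) 1 0 -
              PySem.List.pyGetD (PySem.List.pyGetD h (i - 1) []) 1 0| < t
          then acc ++ [i - 1] else acc) ([] : List Int)) Prod.snd,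
     pvFoldlAppendIte (fun j : Int =>
        j = (h.length : Int) - 1 ∨ t ≤ |PySem.List.pyGetD (PySem.List.pyGetD h (j + 1) []) 1 0 -
          PySem.List.pyGetD (PySem.List.pyGetD h j []) 1 0|)
        (fun j => PySem.List.pyGetD h j [])]
  simp only [List.nil_append]
  rw [pvEnumFilterMap (fun i : Int =>
        decide (i ∉ (PySem.List.pyRange 1 (h.length : Int) 1).foldl (fun acc i =>
          if |PySem.List.pyGetD (PySem.List.pyGetD h i []) 1 0 -
              PySem.List.pyGetD (PySem.List.pyGetD h (i - 1) []) 1 0| < t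
          then acc ++ [i - 1] else acc) ([] : List Int))) h 0]
  have hB := pvRangeFilterMap (fun j : Int =>
      decide (j = (h.length : Int) - 1 ∨ t ≤ |PySem.List.pyGetD (PySem.List.pyGetD h (j + 1) []) 1 0 -
        PySem.List.pyGetD (PySem.List.pyGetD h j []) 1 0|)) h 0
  simp only [zero_add, sub_zero] at hB
  rw [hB]
  apply pvKeep_congr
  intro j hj0 hjn
  simp only [zero_add] at hjn
  rw [decide_eq_decide]
  rw [pvMemToRemove h t j]
  constructor
  · intro hnot
    by_cases hcl : |PySem.List.pyGetD (PySem.List.pyGetD h (j + 1) []) 1 0 -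
        PySem.List.pyGetD (PySem.List.pyGetD h j []) 1 0| < t
    · left
      by_contra hne
      exact hnot ⟨by omega, by omega, hcl⟩
    · right
      omega
  · rintro (hlast | hge) ⟨hc0, hc1, hc2⟩
    · omega
    · omega
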